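-- pv_equiv track=rewrite | github.com/EliottClavier/T-AIA-901 | backend/nlp/token_classification.py | gather_outputs
-- ===== SOURCE A (Python) =====
-- def gather_outputs(outputs: list) -> list:
--     # Group entities by their sequence
--     grouped_entities = []
--     current_group = []
--     for entity in outputs:
--         if not current_group or entity['start'] == current_group[-1]['end']:
--             current_group.append(entity)
--         else:
--             grouped_entities.append(current_group)
--             current_group = [entity]
--
--     # Append the last group
--     if current_group:
--         grouped_entities.append(current_group)
--
--     return grouped_entities
-- ===== SOURCE B (Python) =====
-- def gather_outputs(outputs: list) -> list:
--     # Reverse traversal: build the grouping back-to-front, prepending each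
--     # entity to the following group when it is adjacent, else opening a group.
--     res = []
--     for e in reversed(outputs):
--         if res and e['end'] == res[0][0]['start']:
--             res[0] = [e] + res[0]
--         else:
--             res = [[e]] + res
--     return res
-- ===== Notes on version B (the rewrite author's own statement) =====
-- stated objective: alternative
-- what changed: A scans left-to-right keeping a pending current group and appends finished groups; B traverses the list in reverse, prepending each entity to the already-built following group when adjacent or opening a new group, so there is no pending-group state or final flush.
import Mathlib
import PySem

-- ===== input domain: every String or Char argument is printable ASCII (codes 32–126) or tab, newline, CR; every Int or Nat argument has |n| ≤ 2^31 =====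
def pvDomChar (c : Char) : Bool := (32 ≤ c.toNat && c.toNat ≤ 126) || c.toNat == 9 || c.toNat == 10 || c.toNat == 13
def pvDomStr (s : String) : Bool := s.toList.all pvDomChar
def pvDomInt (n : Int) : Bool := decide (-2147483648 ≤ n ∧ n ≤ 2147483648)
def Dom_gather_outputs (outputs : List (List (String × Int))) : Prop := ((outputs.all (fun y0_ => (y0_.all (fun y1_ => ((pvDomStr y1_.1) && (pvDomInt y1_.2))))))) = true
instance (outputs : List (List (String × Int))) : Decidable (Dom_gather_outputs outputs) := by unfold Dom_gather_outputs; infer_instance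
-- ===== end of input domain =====

-- B replaces A's left scan with pending-group state by a reverse traversal that
-- prepends each entity to the group built so far (alternative decomposition, same cost).

-- ===== PORT A =====
-- entity['start'] on an association-list dict: first match, none = KeyError
def pvGetA (d : List (String × Int)) (k : String) : Option Int := List.lookup k d

-- loop body: 'if not current_group or entity['start'] == current_group[-1]['end']: …'
def pvStepA (st : List (List (List (String × Int))) × List (List (String × Int)))
    (e : List (String × Int)) :
    List (List (List (String × Int))) × List (List (String × Int)) :=
  if h : st.2 = [] then (st.1, st.2 ++ [e])
  else if pvGetA e "start" = pvGetA (st.2.getLast h) "end" then (st.1, st.2 ++ [e])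
  else (st.1 ++ [st.2], [e])

def gather_outputs (outputs : List (List (String × Int))) : List (List (List (String × Int))) :=
  let st := outputs.foldl pvStepA ([], [])
  -- 'if current_group: grouped_entities.append(current_group)'
  if st.2 = [] then st.1 else st.1 ++ [st.2]

-- ===== PORT B =====
-- loop body of B (iterating reversed(outputs)): prepend e to the first group when
-- adjacent ('res and e['end'] == res[0][0]['start']'), else open a new group
def pvStepB (e : List (String × Int)) (res : List (List (List (String × Int)))) :
    List (List (List (String × Int))) :=
  match res with
  | (y :: gs) :: rest =>
      if pvGetA e "end" = pvGetA y "start" then (e :: y :: gs) :: rest else [e] :: res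
  | _ => [e] :: res

def gather_outputs_alt (outputs : List (List (String × Int))) : List (List (List (String × Int))) :=
  outputs.foldr pvStepB []

-- ===== PRECONDITION & SPEC =====
-- Pre_ excludes exactly the inputs on which A raises KeyError: whenever two entities are
-- adjacent in the list, the left one must carry an 'end' key and the right one a 'start' key.
def Pre_gather_outputs (outputs : List (List (String × Int))) : Prop :=
  ((outputs.zip outputs.tail).all
    (fun p => (pvGetA p.1 "end").isSome && (pvGetA p.2 "start").isSome)) = true

instance (outputs : List (List (String × Int))) : Decidable (Pre_gather_outputs outputs) := by
  unfold Pre_gather_outputs; infer_instance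

def pvWitness_gather_outputs : (List (List (String × Int))) :=
  [[("start", 0), ("end", 1)], [("start", 1), ("end", 2)], [("start", 5), ("end", 6)]]

def Spec_gather_outputs (outputs : List (List (String × Int))) (out : List (List (List (String × Int)))) : Prop := out = gather_outputs_alt outputs
instance (outputs : List (List (String × Int))) (out : List (List (List (String × Int)))) : Decidable (Spec_gather_outputs outputs out) := by unfold Spec_gather_outputs; infer_instance

-- ===== CLAIM (what is proved, stated in full; the proofs are below) =====
def Claim_equal_gather_outputs : Prop := ∀ (outputs : List (List (String × Int))), Dom_gather_outputs outputs → Pre_gather_outputs outputs → Spec_gather_outputs outputs (gather_outputs outputs)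

-- ===== LEMMAS AND PROOFS =====

-- attach a pending group c (nonempty) in front of an already-built grouping
def pvGlue (c : List (List (String × Int))) (r : List (List (List (String × Int)))) :
    List (List (List (String × Int))) :=
  match r with
  | (y :: gs) :: rest =>
      if pvGetA y "start" = (c.getLast?.bind fun p => pvGetA p "end")
      then (c ++ y :: gs) :: rest else c :: r
  | _ => c :: r

def pvFin (st : List (List (List (String × Int))) × List (List (String × Int))) :
    List (List (List (String × Int))) :=
  if st.2 = [] then st.1 else st.1 ++ [st.2]

theorem pvGlue_single (x : List (String × Int)) (r : List (List (List (String × Int)))) :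
    pvGlue [x] r = pvStepB x r := by
  cases r with
  | nil => rfl
  | cons g rest =>
    cases g with
    | nil => rfl
    | cons y gs =>
      simp only [pvGlue, pvStepB, List.getLast?_singleton, Option.bind_some]
      by_cases h : pvGetA x "end" = pvGetA y "start"
      · rw [if_pos h.symm, if_pos h]; rfl
      · rw [if_neg (fun hh => h hh.symm), if_neg h]

theorem pvGlue_step_true (c : List (List (String × Int))) (hc : c ≠ [])
    (x : List (String × Int)) (r : List (List (List (String × Int))))
    (hx : pvGetA x "start" = pvGetA (c.getLast hc) "end") :
    pvGlue (c ++ [x]) r = pvGlue c (pvStepB x r) := by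
  have hlast : c.getLast? = some (c.getLast hc) := List.getLast?_eq_some_getLast hc
  have hla : (c ++ [x]).getLast? = some x := by simp
  cases r with
  | nil => simp only [pvStepB, pvGlue, hlast, Option.bind_some]; rw [if_pos hx]
  | cons g rest =>
    cases g with
    | nil => simp only [pvStepB, pvGlue, hlast, Option.bind_some]; rw [if_pos hx]
    | cons y gs =>
      simp only [pvStepB, pvGlue, hla, hlast, Option.bind_some]
      by_cases h : pvGetA x "end" = pvGetA y "start"
      · rw [if_pos h.symm, if_pos h]
        simp [hx]
      · rw [if_neg (fun hh => h hh.symm), if_neg h]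
        simp [hx]

theorem pvGlue_step_false (c : List (List (String × Int))) (hc : c ≠ [])
    (x : List (String × Int)) (r : List (List (List (String × Int))))
    (hx : ¬ pvGetA x "start" = pvGetA (c.getLast hc) "end") :
    pvGlue c (pvStepB x r) = c :: pvGlue [x] r := by
  have hlast : c.getLast? = some (c.getLast hc) := List.getLast?_eq_some_getLast hc
  cases r with
  | nil => simp only [pvStepB, pvGlue, hlast, Option.bind_some]; rw [if_neg hx]
  | cons g rest =>
    cases g with
    | nil => simp only [pvStepB, pvGlue, hlast, Option.bind_some]; rw [if_neg hx]
    | cons y gs =>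
      by_cases h : pvGetA x "end" = pvGetA y "start"
      · simp only [pvStepB, if_pos h, pvGlue, hlast, List.getLast?_singleton,
          Option.bind_some]
        rw [if_neg hx, if_pos h.symm]
        simp
      · simp only [pvStepB, if_neg h, pvGlue, hlast, List.getLast?_singleton,
          Option.bind_some]
        rw [if_neg hx, if_neg (fun hh => h hh.symm)]

theorem pvLoop_eq (xs : List (List (String × Int)))
    (g : List (List (List (String × Int)))) (c : List (List (String × Int))) (hc : c ≠ []) :
    pvFin (xs.foldl pvStepA (g, c)) = g ++ pvGlue c (xs.foldr pvStepB []) := by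
  induction xs generalizing g c with
  | nil => simp [pvFin, pvGlue, hc]
  | cons x xs ih =>
    simp only [List.foldl_cons, List.foldr_cons]
    by_cases h : pvGetA x "start" = pvGetA (c.getLast hc) "end"
    · have hstep : pvStepA (g, c) x = (g, c ++ [x]) := by
        simp only [pvStepA]
        rw [dif_neg hc, if_pos h]
      rw [hstep, ih g (c ++ [x]) (by simp)]
      rw [pvGlue_step_true c hc x _ h]
    · have hstep : pvStepA (g, c) x = (g ++ [c], [x]) := by
        simp only [pvStepA]
        rw [dif_neg hc, if_neg h]
      rw [hstep, ih (g ++ [c]) [x] (by simp)]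
      rw [pvGlue_step_false c hc x _ h]
      simp

theorem gather_outputs_eq (outputs : List (List (String × Int))) :
    gather_outputs outputs = gather_outputs_alt outputs := by
  cases outputs with
  | nil => rfl
  | cons x xs =>
    show pvFin (List.foldl pvStepA ([], []) (x :: xs)) = _
    have hstep : pvStepA ([], []) x = ([], [x]) := by simp [pvStepA]
    simp only [List.foldl_cons, hstep]
    rw [pvLoop_eq xs [] [x] (by simp)]
    simp only [List.nil_append, gather_outputs_alt, List.foldr_cons]
    exact pvGlue_single x _

-- ===== VERDICT (by name: the statement is the Claim_ definition above) =====
theorem gather_outputs_spec : Claim_equal_gather_outputs := by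
  intro outputs _ _
  exact gather_outputs_eq outputs
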